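-- pv_equiv track=rewrite | github.com/MrBrantCode/unitest_baseline | mut_generate/mist_train_taco/taco_13516/solution.py | calculate_snuke_win_probability
-- ===== SOURCE A (Python) =====
-- def calculate_snuke_win_probability(N, A, B):
--     def gcd(a, b):
--         while b:
--             a, b = b, a % b
--         return a
--
--     S = 0
--     Y = []
--     for i in range(N):
--         a, b = A[i], B[i]
--         if b > a:
--             S += b - a
--             Y.append((b, b))
--         else:
--             Y.append((a, b))
--     Y = sorted(Y)
--     YY = [0] * (N + 1)
--     for i in range(N):
--         YY[i + 1] = YY[i] + Y[i][0]
--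
--     def f(i, n):
--         return S - Y[i][0] + Y[i][1] - (YY[n] if n <= i else YY[n + 1] - Y[i][0])
--
--     ma1, ma2 = 0, 1
--     for i in range(N):
--         l = 0
--         r = N
--         while r - l > 1:
--             m = (l + r) // 2
--             if f(i, m) >= 0:
--                 l = m
--             else:
--                 r = m
--         a = l * Y[i][1] + min(f(i, l), Y[i][1])
--         b = N * Y[i][1]
--         if a * ma2 > b * ma1:
--             ma1, ma2 = a, b
--
--     g = gcd(ma1, ma2)
--     return (ma1 // g, ma2 // g)
-- ===== SOURCE B (Python) =====
-- def calculate_snuke_win_probability(N, A, B):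
--     def gcd(a, b):
--         while b:
--             a, b = b, a % b
--         return a
--
--     S = sum(max(0, B[i] - A[i]) for i in range(N))
--     Y = sorted([(max(A[i], B[i]), B[i]) for i in range(N)])
--     YY = [0]
--     for y, _ in Y:
--         YY.append(YY[-1] + y)
--
--     def f(i, n):
--         return S - Y[i][0] + Y[i][1] - (YY[n] if n <= i else YY[n + 1] - Y[i][0])
--
--     ma1, ma2 = 0, 1
--     for i in range(N):
--         l = 0
--         for m in range(1, N):
--             if f(i, m) >= 0:
--                 l = m
--             else:
--                 break
--         a = l * Y[i][1] + min(f(i, l), Y[i][1])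
--         b = N * Y[i][1]
--         if a * ma2 > b * ma1:
--             ma1, ma2 = a, b
--
--     g = gcd(ma1, ma2)
--     return (ma1 // g, ma2 // g)
-- ===== Notes on version B (the rewrite author's own statement) =====
-- stated objective: simpler
-- what changed: The per-i binary search for the threshold index is replaced by a single forward monotone scan with early break, and S/Y/YY are built by comprehensions and a running-sum append loop instead of the one branching index loop and the preallocated-array fill.
-- outside the precondition, e.g. on calculate_snuke_win_probability(4, [-3, -3, -1, 3], [-3, -3, 1, -3]): A returns (1, 1), B returns (1, 3)
import Mathlib
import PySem

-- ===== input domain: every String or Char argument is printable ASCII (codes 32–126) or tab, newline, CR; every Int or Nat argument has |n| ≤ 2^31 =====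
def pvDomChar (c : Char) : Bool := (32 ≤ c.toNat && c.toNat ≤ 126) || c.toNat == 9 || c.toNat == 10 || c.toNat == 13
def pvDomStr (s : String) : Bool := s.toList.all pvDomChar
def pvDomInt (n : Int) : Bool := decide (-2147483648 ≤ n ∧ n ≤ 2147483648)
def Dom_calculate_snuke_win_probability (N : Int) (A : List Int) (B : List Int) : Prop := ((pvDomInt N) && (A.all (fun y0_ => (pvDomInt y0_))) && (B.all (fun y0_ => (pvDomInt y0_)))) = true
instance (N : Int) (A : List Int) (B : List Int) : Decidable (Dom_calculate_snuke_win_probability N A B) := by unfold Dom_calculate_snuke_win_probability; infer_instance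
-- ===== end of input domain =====

-- B replaces the per-i binary search by a forward monotone scan and builds S/Y/YY by
-- comprehensions/running sums: a simpler decomposition, not claimed faster.
-- (Both Pythons also contain identical 'gcd' and 'f' helpers; they are shared below.)

-- shared helpers: the 'gcd' and 'f' inner functions are textually identical in A and in B
-- (pyGcd carries fuel only to be total; b.natAbs+1 steps always complete Euclid's loop)
def pyGcd : Int → Int → Nat → Int
  | a, _, 0 => a
  | a, b, fuel+1 => if b = 0 then a else pyGcd b (PySem.Int.mod a b) fuel

-- f(i, n); list accesses via pyGetD: under Pre_ every index used is provably in range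
def snuke_f (S : Int) (Y : List (Int × Int)) (YY : List Int) (i n : Int) : Int :=
  S - (PySem.List.pyGetD Y i (0, 0)).1 + (PySem.List.pyGetD Y i (0, 0)).2 -
    (if n ≤ i then PySem.List.pyGetD YY n 0
     else PySem.List.pyGetD YY (n + 1) 0 - (PySem.List.pyGetD Y i (0, 0)).1)

-- ===== PORT A =====
-- A's 'while r - l > 1' binary search (fuel N.toNat suffices: r - l shrinks every step)
def bsearchA (S : Int) (Y : List (Int × Int)) (YY : List Int) (i : Int) : Int → Int → Nat → Int
  | l, _, 0 => l
  | l, r, fuel+1 =>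
      if r - l > 1 then
        let m := PySem.Int.floordiv (l + r) 2
        if snuke_f S Y YY i m ≥ 0 then bsearchA S Y YY i m r fuel
        else bsearchA S Y YY i l m fuel
      else l

def calculate_snuke_win_probability (N : Int) (A : List Int) (B : List Int) : Int × Int :=
  let SY := (PySem.List.pyRange 0 N 1).foldl (fun sy i =>
      let a := PySem.List.pyGetD A i 0
      let b := PySem.List.pyGetD B i 0
      if b > a then (sy.1 + (b - a), sy.2 ++ [(b, b)]) else (sy.1, sy.2 ++ [(a, b)]))
    ((0 : Int), ([] : List (Int × Int)))
  let S := SY.1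
  let Y := PySem.List.sorted2 SY.2 Prod.fst Prod.snd
  let YY := (PySem.List.pyRange 0 N 1).foldl (fun yy i =>
      PySem.List.pySetD yy (i + 1) (PySem.List.pyGetD yy i 0 + (PySem.List.pyGetD Y i (0, 0)).1))
    (List.replicate (N + 1).toNat (0 : Int))
  let ma := (PySem.List.pyRange 0 N 1).foldl (fun ma i =>
      let l := bsearchA S Y YY i 0 N N.toNat
      let a := l * (PySem.List.pyGetD Y i (0, 0)).2 +
        min (snuke_f S Y YY i l) (PySem.List.pyGetD Y i (0, 0)).2
      let b := N * (PySem.List.pyGetD Y i (0, 0)).2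
      if a * ma.2 > b * ma.1 then (a, b) else ma) ((0 : Int), (1 : Int))
  let g := pyGcd ma.1 ma.2 (ma.2.natAbs + 1)
  (PySem.Int.floordiv ma.1 g, PySem.Int.floordiv ma.2 g)

-- ===== PORT B =====
-- B's 'for m in range(1, N): … else break' forward scan
def scanB (S : Int) (Y : List (Int × Int)) (YY : List Int) (i : Int) : List Int → Int → Int
  | [], l => l
  | m :: ms, l => if snuke_f S Y YY i m ≥ 0 then scanB S Y YY i ms m else l

def calculate_snuke_win_probability_alt (N : Int) (A : List Int) (B : List Int) : Int × Int :=
  let S := ((PySem.List.pyRange 0 N 1).map (fun i =>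
      max 0 (PySem.List.pyGetD B i 0 - PySem.List.pyGetD A i 0))).sum
  let Y := PySem.List.sorted2 ((PySem.List.pyRange 0 N 1).map (fun i =>
      (max (PySem.List.pyGetD A i 0) (PySem.List.pyGetD B i 0), PySem.List.pyGetD B i 0)))
    Prod.fst Prod.snd
  let YY := Y.foldl (fun yy y => yy ++ [PySem.List.pyGetD yy (-1) 0 + y.1]) [(0 : Int)]
  let ma := (PySem.List.pyRange 0 N 1).foldl (fun ma i =>
      let l := scanB S Y YY i (PySem.List.pyRange 1 N 1) 0
      let a := l * (PySem.List.pyGetD Y i (0, 0)).2 +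
        min (snuke_f S Y YY i l) (PySem.List.pyGetD Y i (0, 0)).2
      let b := N * (PySem.List.pyGetD Y i (0, 0)).2
      if a * ma.2 > b * ma.1 then (a, b) else ma) ((0 : Int), (1 : Int))
  let g := pyGcd ma.1 ma.2 (ma.2.natAbs + 1)
  (PySem.Int.floordiv ma.1 g, PySem.Int.floordiv ma.2 g)

-- ===== PRECONDITION & SPEC =====
-- Pre_ excludes (a) inputs where A raises IndexError (N exceeding a list length) and
-- (b) inputs with a position where both values are negative (max(A[i],B[i]) < 0 — impossible
-- for the problem's nonnegative counts), where f is not monotone and the binary search's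
-- landing index is an accident of probe order.
def Pre_calculate_snuke_win_probability (N : Int) (A : List Int) (B : List Int) : Prop :=
  N ≤ (A.length : Int) ∧ N ≤ (B.length : Int) ∧
    ∀ i ∈ List.range N.toNat, 0 ≤ max (A.getD i 0) (B.getD i 0)
instance (N : Int) (A : List Int) (B : List Int) :
    Decidable (Pre_calculate_snuke_win_probability N A B) := by
  unfold Pre_calculate_snuke_win_probability; infer_instance
def pvWitness_calculate_snuke_win_probability : Int × List Int × List Int := (2, [1, 3], [2, 0])
def Spec_calculate_snuke_win_probability (N : Int) (A : List Int) (B : List Int) (out : Int × Int) : Prop := out = calculate_snuke_win_probability_alt N A B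
instance (N : Int) (A : List Int) (B : List Int) (out : Int × Int) : Decidable (Spec_calculate_snuke_win_probability N A B out) := by unfold Spec_calculate_snuke_win_probability; infer_instance

-- ===== CLAIM (what is proved, stated in full; the proofs are below) =====
def Claim_equal_calculate_snuke_win_probability : Prop := ∀ (N : Int) (A : List Int) (B : List Int), Dom_calculate_snuke_win_probability N A B → Pre_calculate_snuke_win_probability N A B → Spec_calculate_snuke_win_probability N A B (calculate_snuke_win_probability N A B)

-- ===== LEMMAS AND PROOFS =====

-- index bridge: pyGetD at a nonnegative Int index is getD at its toNat
theorem pyGetD_toNat {α : Type} (xs : List α) (n : Int) (d : α) (h : 0 ≤ n) :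
    PySem.List.pyGetD xs n d = xs.getD n.toNat d := by
  conv_lhs => rw [← Int.toNat_of_nonneg h]
  rw [PySem.List.pyGetD_natCast]

theorem getD_append_left {α : Type} (l1 l2 : List α) (n : Nat) (d : α) (h : n < l1.length) :
    (l1 ++ l2).getD n d = l1.getD n d := by
  simp [List.getD, List.getElem?_append_left h]

theorem pySetD_toNat {α : Type} (xs : List α) (n : Nat) (v : α) (h : n < xs.length) :
    PySem.List.pySetD xs (n : Int) v = xs.set n v := by
  simp [PySem.List.pySetD, PySem.List.pySet?, PySem.List.pyIdx?, h]

-- running prefix sums of first components, continuing from s (one entry per element)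
def psums : List (Int × Int) → Int → List Int
  | [], _ => []
  | y :: t, s => (s + y.1) :: psums t (s + y.1)

theorem psums_length (Z : List (Int × Int)) (s : Int) : (psums Z s).length = Z.length := by
  induction Z generalizing s with
  | nil => rfl
  | cons y t ih => simp [psums, ih]

theorem psums_getD (Z : List (Int × Int)) (s : Int) (k : Nat) (h : k < Z.length) :
    (psums Z s).getD k 0 = s + ((Z.take (k + 1)).map Prod.fst).sum := by
  induction Z generalizing s k with
  | nil => simp at h
  | cons y t ih =>
    cases k with
    | zero => simp [psums]
    | succ k =>
      simp only [psums, List.getD_cons_succ, List.take_succ_cons, List.map_cons, List.sum_cons]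
      rw [ih _ k (by simpa using h)]
      ring

theorem psums_append (P Q : List (Int × Int)) (s : Int) :
    psums (P ++ Q) s = psums P s ++ psums Q (s + (P.map Prod.fst).sum) := by
  induction P generalizing s with
  | nil => simp [psums]
  | cons y t ih =>
    simp only [List.cons_append, psums, List.map_cons, List.sum_cons, ih]
    have : s + y.1 + (t.map Prod.fst).sum = s + (y.1 + (t.map Prod.fst).sum) := by ring
    rw [this]

-- getD of the YY list 0 :: psums Z 0 at an index k ≤ len: the sum of the first k entries
theorem czero_getD (Z : List (Int × Int)) (k : Nat) (h : k ≤ Z.length) :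
    ((0 : Int) :: psums Z 0).getD k 0 = ((Z.take k).map Prod.fst).sum := by
  cases k with
  | zero => simp
  | succ k =>
    rw [List.getD_cons_succ, psums_getD Z 0 k (by omega)]
    simp

theorem take_succ_getElem {α : Type} (Z : List α) (k : Nat) (h : k < Z.length) :
    Z.take (k + 1) = Z.take k ++ [Z[k]] := by
  rw [List.take_add_one, List.getElem?_eq_getElem h]; rfl

theorem czero_step (Z : List (Int × Int)) (k : Nat) (h : k < Z.length) :
    ((0 : Int) :: psums Z 0).getD (k + 1) 0
      = ((0 : Int) :: psums Z 0).getD k 0 + (Z.getD k (0, 0)).1 := by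
  rw [czero_getD Z (k + 1) (by omega), czero_getD Z k (by omega),
      take_succ_getElem Z k h, List.getD_eq_getElem Z (0,0) h,
      List.map_append, List.sum_append]
  simp

theorem czero_nonneg_entry (Z : List (Int × Int)) (hfst : ∀ y ∈ Z, 0 ≤ y.1) (k : Nat)
    (h : k < Z.length) : 0 ≤ (Z.getD k (0, 0)).1 := by
  rw [List.getD_eq_getElem Z (0,0) h]
  exact hfst _ (List.getElem_mem h)

-- B's YY loop: appending YY[-1] + y.1 for each y is acc ++ psums
theorem bYY_fold (Z : List (Int × Int)) :
    ∀ (acc : List Int) (h : acc ≠ []),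
      Z.foldl (fun yy y => yy ++ [PySem.List.pyGetD yy (-1) 0 + y.1]) acc
        = acc ++ psums Z (acc.getLast h) := by
  induction Z with
  | nil => intro acc h; simp [psums]
  | cons y t ih =>
    intro acc h
    simp only [List.foldl_cons]
    rw [PySem.List.pyGetD_neg_one acc 0 h]
    rw [ih (acc ++ [acc.getLast h + y.1]) (by simp)]
    have hlast : (acc ++ [acc.getLast h + y.1]).getLast (by simp) = acc.getLast h + y.1 := by
      simp
    rw [hlast]
    simp [psums, List.append_assoc]

theorem set_append_len {α : Type} (l1 l2 : List α) (v : α) :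
    (l1 ++ l2).set l1.length v = l1 ++ l2.set 0 v := by
  induction l1 with
  | nil => rfl
  | cons a t ih => simp [ih]

-- A's YY loop invariant: after the first k steps the array is the prefix sums then zeros
theorem aYY_inv (Y : List (Int × Int)) (n : Nat) (hY : Y.length = n) :
    ∀ k : Nat, k ≤ n →
      (PySem.List.pyRange 0 (k : Int) 1).foldl
        (fun yy i => PySem.List.pySetD yy (i + 1)
          (PySem.List.pyGetD yy i 0 + (PySem.List.pyGetD Y i (0, 0)).1))
        (List.replicate (n + 1) (0 : Int))
      = (((0 : Int) :: psums (Y.take k) 0) ++ List.replicate (n - k) (0 : Int)) := by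
  intro k
  induction k with
  | zero =>
    intro _
    rw [PySem.List.pyRange_one_eq_nil (by omega)]
    simp [List.replicate_succ, psums]
  | succ k ih =>
    intro hk
    have hk' : k ≤ n := by omega
    have hkY : k < Y.length := by omega
    have hplen : (((0 : Int) :: psums (Y.take k) 0)).length = k + 1 := by
      simp only [List.length_cons, psums_length, List.length_take]
      omega
    have hyylen : ((((0 : Int) :: psums (Y.take k) 0)) ++ List.replicate (n - k) (0 : Int)).length = n + 1 := by
      rw [List.length_append, hplen, List.length_replicate]
      omega
    have hsplit : PySem.List.pyRange 0 ((k + 1 : Nat) : Int) 1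
        = PySem.List.pyRange 0 (k : Int) 1 ++ [(k : Int)] := by
      push_cast
      exact PySem.List.pyRange_one_succ_right (by omega)
    rw [hsplit, List.foldl_append, ih hk']
    simp only [List.foldl_cons, List.foldl_nil]
    have hget : PySem.List.pyGetD ((((0 : Int) :: psums (Y.take k) 0)) ++ List.replicate (n - k) (0 : Int)) ((k : Nat) : Int) 0
        = ((Y.take k).map Prod.fst).sum := by
      rw [pyGetD_toNat _ _ _ (by omega), Int.toNat_natCast,
          getD_append_left _ _ _ _ (by omega),
          czero_getD (Y.take k) k (by simp [List.length_take]; omega)]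
      simp [List.take_take]
    have hgetY : PySem.List.pyGetD Y ((k : Nat) : Int) (0, 0) = Y[k] := by
      rw [pyGetD_toNat _ _ _ (by omega), Int.toNat_natCast]
      exact List.getD_eq_getElem Y (0, 0) hkY
    have hset : ((k : Nat) : Int) + 1 = ((k + 1 : Nat) : Int) := by push_cast; ring
    rw [hget, hgetY, hset, pySetD_toNat _ _ _ (by omega)]
    have hrep : n - k = (n - (k + 1)) + 1 := by omega
    have hsetstep : ((((0 : Int) :: psums (Y.take k) 0)) ++ List.replicate (n - k) (0 : Int)).set (k + 1)
        (((Y.take k).map Prod.fst).sum + Y[k].1)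
        = (((0 : Int) :: psums (Y.take (k + 1)) 0)) ++ List.replicate (n - (k + 1)) (0 : Int) := by
      rw [hrep, List.replicate_succ]
      have hsa := set_append_len ((0 : Int) :: psums (Y.take k) 0)
        ((0 : Int) :: List.replicate (n - (k + 1)) (0 : Int))
        (((Y.take k).map Prod.fst).sum + Y[k].1)
      rw [hplen] at hsa
      rw [hsa, List.set_cons_zero, take_succ_getElem Y k hkY, psums_append]
      simp [psums, List.append_assoc]
    exact hsetstep

-- characterisation of the threshold index both searches compute
def searchQ (f : Int → Int) (N l : Int) : Prop :=
  0 ≤ l ∧ l ≤ N - 1 ∧ (l = 0 ∨ 0 ≤ f l) ∧ (l + 1 = N ∨ ¬ 0 ≤ f (l + 1))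

theorem bsearchA_Q (S : Int) (Y : List (Int × Int)) (YY : List Int) (i N : Int) :
    ∀ (fuel : Nat) (l r : Int), 0 ≤ l → l < r → r ≤ N →
      (l = 0 ∨ 0 ≤ snuke_f S Y YY i l) → (r = N ∨ ¬ 0 ≤ snuke_f S Y YY i r) →
      (r - l).toNat ≤ fuel + 1 →
      searchQ (snuke_f S Y YY i) N (bsearchA S Y YY i l r fuel) := by
  intro fuel
  induction fuel with
  | zero =>
    intro l r h0 hlr hrN hl hr hf
    have hr1 : r = l + 1 := by omega
    subst hr1
    simp only [bsearchA]
    exact ⟨h0, by omega, hl, by simpa using hr⟩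
  | succ fuel ih =>
    intro l r h0 hlr hrN hl hr hf
    simp only [bsearchA]
    by_cases hgap : r - l > 1
    · simp only [if_pos hgap]
      have hml : l + 1 ≤ PySem.Int.floordiv (l + r) 2 := by
        rw [PySem.Int.le_floordiv_iff_mul_le (by norm_num)]; omega
      have hmr : PySem.Int.floordiv (l + r) 2 < r := by
        rw [PySem.Int.floordiv_lt_iff_lt_mul (by norm_num)]; omega
      by_cases hfm : snuke_f S Y YY i (PySem.Int.floordiv (l + r) 2) ≥ 0
      · simp only [if_pos hfm]
        exact ih _ r (by omega) (by omega) hrN (Or.inr hfm) hr (by omega)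
      · simp only [if_neg hfm]
        exact ih l _ h0 (by omega) (by omega) hl (Or.inr hfm) (by omega)
    · simp only [if_neg hgap]
      have hr1 : r = l + 1 := by omega
      subst hr1
      exact ⟨h0, by omega, hl, by simpa using hr⟩

theorem scanB_Q (S : Int) (Y : List (Int × Int)) (YY : List Int) (i N : Int) :
    ∀ (k : Nat) (l0 : Int), (N - (l0 + 1)).toNat = k → 0 ≤ l0 → l0 ≤ N - 1 →
      (l0 = 0 ∨ 0 ≤ snuke_f S Y YY i l0) →
      searchQ (snuke_f S Y YY i) N (scanB S Y YY i (PySem.List.pyRange (l0 + 1) N 1) l0) := by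
  intro k
  induction k with
  | zero =>
    intro l0 hk h0 hN hl
    rw [PySem.List.pyRange_one_eq_nil (by omega)]
    simp only [scanB]
    exact ⟨h0, hN, hl, Or.inl (by omega)⟩
  | succ k ih =>
    intro l0 hk h0 hN hl
    have hlt : l0 + 1 < N := by omega
    rw [PySem.List.pyRange_one_cons hlt]
    by_cases hfm : snuke_f S Y YY i (l0 + 1) ≥ 0
    · simp only [scanB, if_pos hfm]
      have := ih (l0 + 1) (by omega) (by omega) (by omega) (Or.inr hfm)
      simpa using this
    · simp only [scanB, if_neg hfm]
      exact ⟨h0, hN, hl, Or.inr (by simpa using hfm)⟩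

theorem searchQ_unique (f : Int → Int) (N : Int)
    (hmono : ∀ m : Int, 1 ≤ m → m + 1 ≤ N - 1 → 0 ≤ f (m + 1) → 0 ≤ f m) :
    ∀ l1 l2 : Int, searchQ f N l1 → searchQ f N l2 → l1 = l2 := by
  have chain : ∀ (d : Nat) (j : Int), 1 ≤ j → j + d ≤ N - 1 → 0 ≤ f (j + d) → 0 ≤ f j := by
    intro d
    induction d with
    | zero => intro j h1 h2 h3; simpa using h3
    | succ d ih =>
      intro j h1 h2 h3
      have hc : ((d + 1 : Nat) : Int) = (d : Int) + 1 := by push_cast; ring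
      have h4 : 0 ≤ f (j + d + 1) := by
        rw [hc] at h3
        have : j + ((d : Int) + 1) = j + d + 1 := by ring
        rwa [this] at h3
      have hd : (0 : Int) ≤ (d : Int) := by positivity
      have h5 : 0 ≤ f (j + d) := hmono (j + d) (by omega) (by omega) h4
      exact ih j h1 (by omega) h5
  have lt_absurd : ∀ l1 l2 : Int, searchQ f N l1 → searchQ f N l2 → l1 < l2 → False := by
    intro l1 l2 ⟨a1, b1, _, d1⟩ ⟨a2, b2, c2, _⟩ hlt
    have hnl1 : ¬ 0 ≤ f (l1 + 1) := by
      rcases d1 with h | h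
      · omega
      · exact h
    have hfl2 : 0 ≤ f l2 := by
      rcases c2 with h | h
      · omega
      · exact h
    have hd : ((l2 - l1 - 1).toNat : Int) = l2 - l1 - 1 := by omega
    have : 0 ≤ f (l1 + 1) := by
      refine chain (l2 - l1 - 1).toNat (l1 + 1) (by omega) (by omega) ?_
      have : l1 + 1 + ((l2 - l1 - 1).toNat : Int) = l2 := by omega
      rwa [this]
    exact hnl1 this
  intro l1 l2 q1 q2
  rcases lt_trichotomy l1 l2 with h | h | h
  · exact absurd h (fun h => (lt_absurd l1 l2 q1 q2 h).elim)
  · exact h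
  · exact absurd h (fun h => (lt_absurd l2 l1 q2 q1 h).elim)

-- monotonicity of f(i, ·) over the prefix-sum YY when every Y[j].1 is nonnegative
theorem snuke_f_mono (S : Int) (Y : List (Int × Int)) (N i : Int)
    (hlen : (Y.length : Int) = N) (hfst : ∀ y ∈ Y, 0 ≤ y.1)
    (hi0 : 0 ≤ i) (_hiN : i ≤ N - 1) :
    ∀ m : Int, 1 ≤ m → m + 1 ≤ N - 1 →
      0 ≤ snuke_f S Y ((0 : Int) :: psums Y 0) i (m + 1) →
      0 ≤ snuke_f S Y ((0 : Int) :: psums Y 0) i m := by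
  intro m hm1 hmN
  unfold snuke_f
  rw [pyGetD_toNat Y i (0,0) hi0]
  rw [pyGetD_toNat _ m 0 (by omega), pyGetD_toNat _ (m + 1) 0 (by omega),
      pyGetD_toNat _ (m + 1 + 1) 0 (by omega)]
  have e1 : (m + 1).toNat = m.toNat + 1 := by omega
  have e2 : (m + 1 + 1).toNat = m.toNat + 1 + 1 := by omega
  rw [e1, e2]
  have hmlen : m.toNat + 1 < Y.length := by omega
  have hs1 := czero_step Y m.toNat (by omega)
  have hs2 := czero_step Y (m.toNat + 1) (by omega)
  have hn1 := czero_nonneg_entry Y hfst m.toNat (by omega)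
  have hn2 := czero_nonneg_entry Y hfst (m.toNat + 1) (by omega)
  by_cases hc1 : m + 1 ≤ i
  · rw [if_pos (by omega : m ≤ i), if_pos hc1]
    intro h
    omega
  · by_cases hc2 : m ≤ i
    · -- i = m
      have hieq : i = m := by omega
      rw [if_pos hc2, if_neg hc1]
      have : i.toNat = m.toNat := by omega
      rw [this]
      intro h
      omega
    · rw [if_neg hc2, if_neg hc1]
      intro h
      omega

-- the two searches agree
theorem search_eq (S : Int) (Y : List (Int × Int)) (N i : Int)
    (hlen : (Y.length : Int) = N) (hN : 0 < N) (hfst : ∀ y ∈ Y, 0 ≤ y.1)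
    (hi0 : 0 ≤ i) (hiN : i ≤ N - 1) :
    bsearchA S Y ((0 : Int) :: psums Y 0) i 0 N N.toNat
      = scanB S Y ((0 : Int) :: psums Y 0) i (PySem.List.pyRange 1 N 1) 0 := by
  have hmono := snuke_f_mono S Y N i hlen hfst hi0 hiN
  have hfuel : (N - 0).toNat ≤ N.toNat + 1 := by omega
  have q1 : searchQ (snuke_f S Y ((0:Int) :: psums Y 0) i) N
      (bsearchA S Y ((0:Int) :: psums Y 0) i 0 N N.toNat) :=
    bsearchA_Q S Y _ i N N.toNat 0 N le_rfl hN le_rfl (Or.inl rfl) (Or.inl rfl) (by omega)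
  have q2 : searchQ (snuke_f S Y ((0:Int) :: psums Y 0) i) N
      (scanB S Y ((0:Int) :: psums Y 0) i (PySem.List.pyRange (0 + 1) N 1) 0) :=
    scanB_Q S Y _ i N (N - 1).toNat 0 (by omega) le_rfl (by omega) (Or.inl rfl)
  rw [show (0 : Int) + 1 = 1 by ring] at q2
  exact searchQ_unique _ N hmono _ _ q1 q2

-- A's first loop computes the same S and the same pre-sort list as B's comprehensions
theorem SY_fold (N : Int) (A B : List Int) :
    (PySem.List.pyRange 0 N 1).foldl (fun sy i =>
        let a := PySem.List.pyGetD A i 0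
        let b := PySem.List.pyGetD B i 0
        if b > a then (sy.1 + (b - a), sy.2 ++ [(b, b)]) else (sy.1, sy.2 ++ [(a, b)]))
      ((0 : Int), ([] : List (Int × Int)))
    = (((PySem.List.pyRange 0 N 1).map (fun i =>
          max 0 (PySem.List.pyGetD B i 0 - PySem.List.pyGetD A i 0))).sum,
       (PySem.List.pyRange 0 N 1).map (fun i =>
          (max (PySem.List.pyGetD A i 0) (PySem.List.pyGetD B i 0), PySem.List.pyGetD B i 0))) := by
  rw [PySem.List.foldl_congr_mem (PySem.List.pyRange 0 N 1) _
      (fun sy i => (sy.1 + max 0 (PySem.List.pyGetD B i 0 - PySem.List.pyGetD A i 0),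
        sy.2 ++ [(max (PySem.List.pyGetD A i 0) (PySem.List.pyGetD B i 0), PySem.List.pyGetD B i 0)]))
      ((0 : Int), ([] : List (Int × Int)))
      (by
        intro acc x _
        dsimp only
        by_cases hba : PySem.List.pyGetD B x 0 > PySem.List.pyGetD A x 0
        · rw [if_pos hba, max_eq_right hba.le, max_eq_right (by omega)]
        · rw [if_neg hba, max_eq_left (by omega), max_eq_left (by omega)]
          simp)]
  rw [PySem.List.foldl_prod_mk
      (f := fun s e => s + max 0 (PySem.List.pyGetD B e 0 - PySem.List.pyGetD A e 0))
      (g := fun s e => s ++ [(max (PySem.List.pyGetD A e 0) (PySem.List.pyGetD B e 0),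
        PySem.List.pyGetD B e 0)])]
  rw [PySem.List.foldl_add, PySem.List.foldl_append_singleton_eq_map]
  simp

theorem aYY_eq (N : Int) (hN : 0 < N) (Y : List (Int × Int)) (hlen : (Y.length : Int) = N) :
    (PySem.List.pyRange 0 N 1).foldl
      (fun yy i => PySem.List.pySetD yy (i + 1)
        (PySem.List.pyGetD yy i 0 + (PySem.List.pyGetD Y i (0, 0)).1))
      (List.replicate (N + 1).toNat (0 : Int))
    = (0 : Int) :: psums Y 0 := by
  have h1 : (N + 1).toNat = Y.length + 1 := by omega
  have h2 : N = ((Y.length : Nat) : Int) := by omega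
  rw [h1, h2, aYY_inv Y Y.length rfl Y.length le_rfl]
  simp [List.take_length]

theorem bYY_eq (Y : List (Int × Int)) :
    Y.foldl (fun yy y => yy ++ [PySem.List.pyGetD yy (-1) 0 + y.1]) [(0 : Int)]
      = (0 : Int) :: psums Y 0 := by
  rw [bYY_fold Y [(0 : Int)] (by simp)]
  simp

-- the two main loops agree once the searches do
theorem ma_fold_eq (N S : Int) (Y : List (Int × Int)) (hlen : (Y.length : Int) = N)
    (hN : 0 < N) (hfst : ∀ y ∈ Y, 0 ≤ y.1) :
    (PySem.List.pyRange 0 N 1).foldl (fun ma i =>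
        let l := bsearchA S Y ((0 : Int) :: psums Y 0) i 0 N N.toNat
        let a := l * (PySem.List.pyGetD Y i (0, 0)).2 +
          min (snuke_f S Y ((0 : Int) :: psums Y 0) i l) (PySem.List.pyGetD Y i (0, 0)).2
        let b := N * (PySem.List.pyGetD Y i (0, 0)).2
        if a * ma.2 > b * ma.1 then (a, b) else ma) ((0 : Int), (1 : Int))
    = (PySem.List.pyRange 0 N 1).foldl (fun ma i =>
        let l := scanB S Y ((0 : Int) :: psums Y 0) i (PySem.List.pyRange 1 N 1) 0
        let a := l * (PySem.List.pyGetD Y i (0, 0)).2 +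
          min (snuke_f S Y ((0 : Int) :: psums Y 0) i l) (PySem.List.pyGetD Y i (0, 0)).2
        let b := N * (PySem.List.pyGetD Y i (0, 0)).2
        if a * ma.2 > b * ma.1 then (a, b) else ma) ((0 : Int), (1 : Int)) := by
  apply PySem.List.foldl_congr_mem
  intro ma i hi
  rw [PySem.List.mem_pyRange_one] at hi
  dsimp only
  rw [search_eq S Y N i hlen hN hfst hi.1 (by omega)]

theorem main_equiv : ∀ (N : Int) (A B : List Int), Pre_calculate_snuke_win_probability N A B →
    calculate_snuke_win_probability N A B = calculate_snuke_win_probability_alt N A B := by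
  intro N A B hpre
  obtain ⟨hNA, hNB, hmax⟩ := hpre
  by_cases hN : N ≤ 0
  · unfold calculate_snuke_win_probability calculate_snuke_win_probability_alt
    rw [PySem.List.pyRange_one_eq_nil hN]
    rfl
  · replace hN : 0 < N := by omega
    unfold calculate_snuke_win_probability calculate_snuke_win_probability_alt
    simp only [SY_fold]
    set Yc := PySem.List.sorted2 ((PySem.List.pyRange 0 N 1).map fun i =>
        (max (PySem.List.pyGetD A i 0) (PySem.List.pyGetD B i 0), PySem.List.pyGetD B i 0))
        Prod.fst Prod.snd with hYc
    have hperm := PySem.List.sorted2_perm ((PySem.List.pyRange 0 N 1).map fun i =>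
        (max (PySem.List.pyGetD A i 0) (PySem.List.pyGetD B i 0), PySem.List.pyGetD B i 0))
        Prod.fst Prod.snd false
    have hlenY : (Yc.length : Int) = N := by
      rw [hYc, hperm.length_eq, List.length_map, PySem.List.length_pyRange_one 0 N]
      omega
    have hfstY : ∀ y ∈ Yc, 0 ≤ y.1 := by
      intro y hy
      rw [hYc] at hy
      have hy' := hperm.mem_iff.mp hy
      rw [List.mem_map] at hy'
      obtain ⟨i, hiR, rfl⟩ := hy'
      rw [PySem.List.mem_pyRange_one] at hiR
      dsimp only
      rw [pyGetD_toNat A i 0 hiR.1, pyGetD_toNat B i 0 hiR.1]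
      exact hmax i.toNat (List.mem_range.mpr (by omega))
    rw [aYY_eq N hN Yc hlenY, bYY_eq Yc, ma_fold_eq N _ Yc hlenY hN hfstY]

-- ===== VERDICT (by name: the statement is the Claim_ definition above) =====
theorem calculate_snuke_win_probability_spec : Claim_equal_calculate_snuke_win_probability := by
  intro N A B _ hpre
  unfold Spec_calculate_snuke_win_probability
  exact main_equiv N A B hpre
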